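-- pv_equiv track=rewrite | github.com/halower/stock_project | stock_app_service/app/services/limit_board/limit_board_service.py | _calculate_continuous_limit_days
-- ===== SOURCE A (Python) =====
-- from typing import List, Dict, Any, Optional
--
-- def _calculate_continuous_limit_days(
--
--     ts_code: str,
--     recent_limit_data: List[Dict[str, Any]]
-- ) -> int:
--     """
--     计算连板天数
--
--     Args:
--         ts_code: 股票代码
--         recent_limit_data: 最近几天的涨停数据列表（按日期从旧到新排序）
--
--     Returns:
--         连板天数
--     """
--     continuous_days = 0
--
--     # 从最新的一天往前数
--     for day_data in reversed(recent_limit_data):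
--         # 检查这一天是否涨停
--         stock_data = next((item for item in day_data.get('data', []) if item.get('ts_code') == ts_code), None)
--         if stock_data:
--             continuous_days += 1
--         else:
--             # 一旦中断就停止计数
--             break
--
--     return continuous_days
-- ===== SOURCE B (Python) =====
-- from typing import List, Dict, Any
--
-- def _calculate_continuous_limit_days(
--     ts_code: str,
--     recent_limit_data: List[Dict[str, Any]]
-- ) -> int:
--     # Map each day (newest first) to a boolean "stock hit limit-up that day",
--     # then the answer is the length of the leading run of True values.
--     flags = [
--         any(item.get('ts_code') == ts_code for item in day.get('data', []))
--         for day in reversed(recent_limit_data)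
--     ]
--     return flags.index(False) if False in flags else len(flags)
-- ===== Notes on version B (the rewrite author's own statement) =====
-- stated objective: idiomatic
-- what changed: Replaces the interleaved count-and-break loop with a two-phase pipeline: map each day to a boolean hit-flag, then return the index of the first False (the length of the leading True run).
import Mathlib
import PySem

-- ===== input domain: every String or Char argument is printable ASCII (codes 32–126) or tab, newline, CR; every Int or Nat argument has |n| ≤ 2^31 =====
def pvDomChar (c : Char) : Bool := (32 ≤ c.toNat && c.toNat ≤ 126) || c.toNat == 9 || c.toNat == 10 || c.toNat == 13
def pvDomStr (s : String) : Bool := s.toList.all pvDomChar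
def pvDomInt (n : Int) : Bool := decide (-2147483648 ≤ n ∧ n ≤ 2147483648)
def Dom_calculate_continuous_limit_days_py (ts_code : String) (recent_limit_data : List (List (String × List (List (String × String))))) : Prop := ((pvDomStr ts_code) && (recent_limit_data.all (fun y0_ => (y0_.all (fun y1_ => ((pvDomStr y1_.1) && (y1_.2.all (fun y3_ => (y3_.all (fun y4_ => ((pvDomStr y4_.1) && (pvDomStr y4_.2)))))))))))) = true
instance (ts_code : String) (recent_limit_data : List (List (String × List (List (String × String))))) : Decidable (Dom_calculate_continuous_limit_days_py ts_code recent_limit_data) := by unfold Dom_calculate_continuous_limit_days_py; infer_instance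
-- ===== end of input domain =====

-- B replaces A's interleaved count-and-break loop with a map-to-booleans pass
-- followed by taking the index of the first False (objective: idiomatic).

-- shared helper: Python dict.get on an association list (first match)
def pvAssocGet? {α : Type} (d : List (String × α)) (k : String) : Option α :=
  (d.find? (fun p => p.1 == k)).map (·.2)

def pvAssocGetD {α : Type} (d : List (String × α)) (k : String) (dflt : α) : α :=
  (pvAssocGet? d k).getD dflt

-- ===== PORT A =====
-- A's loop over reversed(recent_limit_data), carrying continuous_days and breaking
-- on the first day whose looked-up stock_data is falsy (None or empty dict).
def pvLoopA (ts_code : String) : List (List (String × List (List (String × String)))) → Int → Int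
  | [], acc => acc
  | day :: rest, acc =>
    match (pvAssocGetD day "data" []).find? (fun item => pvAssocGet? item "ts_code" == some ts_code) with
    | some stock_data => if stock_data.isEmpty then acc else pvLoopA ts_code rest (acc + 1)
    | none => acc

def calculate_continuous_limit_days_py (ts_code : String) (recent_limit_data : List (List (String × List (List (String × String))))) : Int :=
  pvLoopA ts_code recent_limit_data.reverse 0

-- ===== PORT B =====
def calculate_continuous_limit_days_py_alt (ts_code : String) (recent_limit_data : List (List (String × List (List (String × String))))) : Int :=
  let flags := recent_limit_data.reverse.map
    (fun day => (pvAssocGetD day "data" []).any (fun item => pvAssocGet? item "ts_code" == some ts_code))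
  match PySem.List.index? flags false with
  | some k => (k : Int)
  | none => (flags.length : Int)

-- ===== PRECONDITION & SPEC =====
def Spec_calculate_continuous_limit_days_py (ts_code : String) (recent_limit_data : List (List (String × List (List (String × String))))) (out : Int) : Prop := out = calculate_continuous_limit_days_py_alt ts_code recent_limit_data
instance (ts_code : String) (recent_limit_data : List (List (String × List (List (String × String))))) (out : Int) : Decidable (Spec_calculate_continuous_limit_days_py ts_code recent_limit_data out) := by unfold Spec_calculate_continuous_limit_days_py; infer_instance

-- ===== CLAIM (what is proved, stated in full; the proofs are below) =====
def Claim_equal_calculate_continuous_limit_days_py : Prop := ∀ (ts_code : String) (recent_limit_data : List (List (String × List (List (String × String))))), Dom_calculate_continuous_limit_days_py ts_code recent_limit_data → Spec_calculate_continuous_limit_days_py ts_code recent_limit_data (calculate_continuous_limit_days_py ts_code recent_limit_data)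

-- ===== LEMMAS AND PROOFS =====

-- per-day predicate used to characterise both sides
def pvPred (ts_code : String) (day : List (String × List (List (String × String)))) : Bool :=
  (pvAssocGetD day "data" []).any (fun item => pvAssocGet? item "ts_code" == some ts_code)

-- B's count of the leading run of trues, as a function of the flag list
def pvAltCount (flags : List Bool) : Int :=
  match PySem.List.index? flags false with
  | some k => (k : Int)
  | none => (flags.length : Int)

-- an item on which the lookup succeeds is a non-empty dict
lemma pvItem_nonempty (ts_code : String) (item : List (String × String))
    (h : (pvAssocGet? item "ts_code" == some ts_code) = true) : item.isEmpty = false := by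
  cases item with
  | nil => simp [pvAssocGet?] at h
  | cons a l => rfl

lemma pvFind?_isSome_eq_any {α : Type} (p : α → Bool) (l : List α) :
    (l.find? p).isSome = l.any p := by
  induction l with
  | nil => rfl
  | cons a l ih =>
    by_cases h : p a = true
    · simp [h]
    · simp only [Bool.not_eq_true] at h
      simp [h, ih]

lemma pvFind_iff_pred (ts_code : String) (day : List (String × List (List (String × String)))) :
    ((pvAssocGetD day "data" []).find? (fun item => pvAssocGet? item "ts_code" == some ts_code)).isSome
      = pvPred ts_code day := by
  simp [pvPred, pvFind?_isSome_eq_any]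

lemma pvAltCount_cons (b : Bool) (flags : List Bool) :
    pvAltCount (b :: flags) = if b then 1 + pvAltCount flags else 0 := by
  cases b with
  | false =>
    simp [pvAltCount, PySem.List.index?_eq_idxOf?, List.idxOf?_cons]
  | true =>
    cases h : List.idxOf? false flags with
    | none =>
      simp [pvAltCount, PySem.List.index?_eq_idxOf?, List.idxOf?_cons, h]
      ring
    | some k =>
      simp [pvAltCount, PySem.List.index?_eq_idxOf?, List.idxOf?_cons, h]
      ring

lemma pvLoopA_eq (ts_code : String) (l : List (List (String × List (List (String × String))))) :
    ∀ acc : Int, pvLoopA ts_code l acc = acc + pvAltCount (l.map (pvPred ts_code)) := by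
  induction l with
  | nil => intro acc; simp [pvLoopA, pvAltCount, PySem.List.index?]
  | cons day rest ih =>
    intro acc
    have hp := pvFind_iff_pred ts_code day
    rw [pvLoopA]
    cases hf : (pvAssocGetD day "data" []).find? (fun item => pvAssocGet? item "ts_code" == some ts_code) with
    | none =>
      rw [hf] at hp
      simp only [Option.isSome_none] at hp
      simp [List.map_cons, pvAltCount_cons, ← hp]
    | some sd =>
      rw [hf] at hp
      simp only [Option.isSome_some] at hp
      have hps := List.find?_some hf
      have hsd : sd.isEmpty = false := pvItem_nonempty ts_code sd hps
      simp [hsd, ih, List.map_cons, pvAltCount_cons, ← hp]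
      ring

-- ===== VERDICT (by name: the statement is the Claim_ definition above) =====
theorem calculate_continuous_limit_days_py_spec : Claim_equal_calculate_continuous_limit_days_py := by
  intro ts_code recent_limit_data _
  unfold Spec_calculate_continuous_limit_days_py calculate_continuous_limit_days_py calculate_continuous_limit_days_py_alt
  rw [pvLoopA_eq]
  simp only [zero_add]
  rfl
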